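-- pv_equiv track=rewrite | github.com/Motoiis/Datachecker | Datachecker.py | reset_consecutive_values
-- ===== SOURCE A (Python) =====
-- def reset_consecutive_values(data, range_min, range_max, n):
--     count = 0  # 連続カウント用の変数
--     to_reset = []  # 0にリセットするインデックスを保持するリスト
--
--     for i in range(len(data)):
--         # 現在のデータが指定範囲内かどうかをチェック
--         if range_min <= data[i] <= range_max:
--             count += 1
--             # 連続して範囲内の数字がn個続いた場合
--             if count == n:
--                 # 連続したn個のインデックスをto_resetに追加
--                 for j in range(n):
--                     to_reset.append(i - j)
--         else:
--             count = 0  # 連続カウントをリセット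
--
--     # to_resetのインデックスに対応するデータを0に変更
--     for idx in to_reset:
--         data[idx] = 0
--
--     return data
-- ===== SOURCE B (Python) =====
-- def reset_consecutive_values(data, range_min, range_max, n):
--     # Run-segmentation rewrite: find each maximal run of in-range values and
--     # zero its first n elements (in place) when the run is at least n long.
--     def ok(x):
--         return range_min <= x <= range_max
--
--     res = []
--     i = 0
--     L = len(data)
--     while i < L:
--         if ok(data[i]):
--             j = i
--             while j < L and ok(data[j]):
--                 j += 1
--             run = data[i:j]
--             if j - i >= n:
--                 run[:max(n, 0)] = [0] * max(n, 0)
--             res.extend(run)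
--             i = j
--         else:
--             res.append(data[i])
--             i += 1
--     data[:] = res
--     return data
-- ===== Notes on version B (the rewrite author's own statement) =====
-- stated objective: alternative
-- what changed: Replaces A's running in-range counter plus a collected to_reset index list (applied in a second pass) with a run-segmentation scan: split the list into maximal in-range runs and zero the first n elements of each run of length >= n.
import Mathlib
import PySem

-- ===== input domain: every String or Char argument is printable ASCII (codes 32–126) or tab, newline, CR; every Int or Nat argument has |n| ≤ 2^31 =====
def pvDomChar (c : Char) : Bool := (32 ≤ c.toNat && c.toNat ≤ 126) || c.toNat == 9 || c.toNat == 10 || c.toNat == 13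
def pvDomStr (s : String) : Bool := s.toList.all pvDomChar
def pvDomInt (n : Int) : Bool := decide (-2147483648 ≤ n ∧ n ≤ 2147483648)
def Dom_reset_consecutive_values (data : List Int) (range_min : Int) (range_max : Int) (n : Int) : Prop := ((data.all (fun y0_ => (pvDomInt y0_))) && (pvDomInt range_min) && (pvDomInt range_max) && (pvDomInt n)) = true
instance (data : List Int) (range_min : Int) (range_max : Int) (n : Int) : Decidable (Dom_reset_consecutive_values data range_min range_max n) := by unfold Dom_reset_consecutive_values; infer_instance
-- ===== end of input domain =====

-- B re-implements A by segmenting the list into maximal in-range runs and zeroing the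
-- first n elements of each run of length ≥ n, instead of A's running counter plus an
-- index-reset list (objective: alternative decomposition, same O(len) cost).
-- Both Pythons mutate `data` in place the same way; the theorems are about the return value.

-- ===== PORT A =====
-- data[idx] = 0 : exact for every in-range index, incl. Python's negative wraparound;
-- (A only ever produces in-range non-negative indices, so the out-of-range no-op is never hit.)
def pvSetZero (d : List Int) (idx : Int) : List Int :=
  if idx < 0 then d.set (d.length + idx).toNat 0 else d.set idx.toNat 0

def reset_consecutive_values (data : List Int) (range_min : Int) (range_max : Int) (n : Int) : List Int :=
  -- count = 0; to_reset = []; for i in range(len(data)): …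
  (((PySem.List.pyRange 0 (data.length : Int) 1).foldl
    (fun (st : Int × List Int) i =>
      if range_min ≤ PySem.List.pyGetD data i 0 ∧ PySem.List.pyGetD data i 0 ≤ range_max then
        if st.1 + 1 = n then
          (st.1 + 1, st.2 ++ (PySem.List.pyRange 0 n 1).map (fun j => i - j))
        else (st.1 + 1, st.2)
      else (0, st.2))
    (0, ([] : List Int))).2
  -- for idx in to_reset: data[idx] = 0
  ).foldl pvSetZero data

-- ===== PORT B =====
def altGo (range_min range_max n : Int) : List Int → List Int
  | [] => []
  | x :: xs =>
    if h : range_min ≤ x ∧ x ≤ range_max then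
      -- run = data[i:j] (the maximal in-range run); if j - i >= n: run[:max(n,0)] = [0]*max(n,0)
      (if n ≤ (((x :: xs).takeWhile fun y => decide (range_min ≤ y ∧ y ≤ range_max)).length : Int) then
         List.replicate (max n 0).toNat 0 ++
           (((x :: xs).takeWhile fun y => decide (range_min ≤ y ∧ y ≤ range_max)).drop (max n 0).toNat)
       else (x :: xs).takeWhile fun y => decide (range_min ≤ y ∧ y ≤ range_max))
      ++ altGo range_min range_max n ((x :: xs).dropWhile fun y => decide (range_min ≤ y ∧ y ≤ range_max))
    else x :: altGo range_min range_max n xs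
  termination_by l => l.length
  decreasing_by
  · rw [List.dropWhile_cons_of_pos (by simp [h.1, h.2])]
    have := List.length_dropWhile_le (fun y => decide (range_min ≤ y ∧ y ≤ range_max)) xs
    simp only [List.length_cons]; omega
  · simp

def reset_consecutive_values_alt (data : List Int) (range_min : Int) (range_max : Int) (n : Int) : List Int :=
  altGo range_min range_max n data

-- ===== PRECONDITION & SPEC =====
def Spec_reset_consecutive_values (data : List Int) (range_min : Int) (range_max : Int) (n : Int) (out : List Int) : Prop := out = reset_consecutive_values_alt data range_min range_max n
instance (data : List Int) (range_min : Int) (range_max : Int) (n : Int) (out : List Int) : Decidable (Spec_reset_consecutive_values data range_min range_max n out) := by unfold Spec_reset_consecutive_values; infer_instance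

-- ===== CLAIM (what is proved, stated in full; the proofs are below) =====
def Claim_equal_reset_consecutive_values : Prop := ∀ (data : List Int) (range_min : Int) (range_max : Int) (n : Int), Dom_reset_consecutive_values data range_min range_max n → Spec_reset_consecutive_values data range_min range_max n (reset_consecutive_values data range_min range_max n)

-- ===== LEMMAS AND PROOFS =====

-- A's scan, phrased structurally over the suffix: `c` is the running count, `i` the
-- absolute index of the suffix head; returns the indices A appends to to_reset.
def pvCollect (range_min range_max n : Int) : Int → Int → List Int → List Int
  | _, _, [] => []
  | c, i, x :: xs =>
    if range_min ≤ x ∧ x ≤ range_max then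
      (if c + 1 = n then (PySem.List.pyRange 0 n 1).map (fun j => i - j) else [])
        ++ pvCollect range_min range_max n (c + 1) (i + 1) xs
    else pvCollect range_min range_max n 0 (i + 1) xs

lemma pvDropWhileHead (p : Int → Bool) (l : List Int) (y : Int) (ys : List Int)
    (h : l.dropWhile p = y :: ys) : p y = false := by
  have hne : l.dropWhile p ≠ [] := by simp [h]
  have hh := List.head_dropWhile_not (p := p) (l := l) (w := hne)
  simp only [h, List.head_cons] at hh
  exact hh

lemma pvSetZero_append (p l : List Int) (t : Nat) :
    pvSetZero (p ++ l) ((p.length : Int) + t) = p ++ l.set t 0 := by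
  unfold pvSetZero
  rw [if_neg (by omega)]
  have h : (((p.length : Int)) + t).toNat = p.length + t := by omega
  rw [h]; simp

-- A's index loop equals pvCollect on the suffix.
lemma pvFold_eq_collect (range_min range_max n : Int) (data : List Int) :
    ∀ (N k : Nat) (c : Int) (acc : List Int), data.length - k ≤ N → k ≤ data.length →
    ((PySem.List.pyRange (k : Int) (data.length : Int) 1).foldl
      (fun (st : Int × List Int) i =>
        if range_min ≤ PySem.List.pyGetD data i 0 ∧ PySem.List.pyGetD data i 0 ≤ range_max then
          if st.1 + 1 = n then
            (st.1 + 1, st.2 ++ (PySem.List.pyRange 0 n 1).map (fun j => i - j))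
          else (st.1 + 1, st.2)
        else (0, st.2))
      (c, acc)).2 = acc ++ pvCollect range_min range_max n c k (data.drop k) := by
  intro N
  induction N with
  | zero =>
    intro k c acc h1 h2
    have hk : k = data.length := by omega
    subst hk
    rw [PySem.List.pyRange_one_eq_nil (a := (data.length : Int)) (b := (data.length : Int)) (by omega)]
    simp [pvCollect]
  | succ N ih =>
    intro k c acc h1 h2
    by_cases hk : k = data.length
    · subst hk
      rw [PySem.List.pyRange_one_eq_nil (a := (data.length : Int)) (b := (data.length : Int)) (by omega)]
      simp [pvCollect]
    · have hklt : k < data.length := by omega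
      rw [PySem.List.pyRange_one_cons (a := (k : Int)) (b := (data.length : Int)) (by exact_mod_cast hklt), List.foldl_cons,
        List.drop_eq_getElem_cons hklt]
      have hget : PySem.List.pyGetD data (k : Int) 0 = data[k] := by
        rw [PySem.List.pyGetD_natCast, List.getD_eq_getElem data 0 hklt]
      have hcast : (k : Int) + 1 = ((k + 1 : Nat) : Int) := by push_cast; ring
      rw [hget]
      by_cases hok : range_min ≤ data[k] ∧ data[k] ≤ range_max
      · by_cases hcn : c + 1 = n
        · rw [if_pos hok, if_pos hcn, hcast, ih (k + 1) _ _ (by omega) (by omega)]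
          simp [pvCollect, hok, hcn]
        · rw [if_pos hok, if_neg hcn, hcast, ih (k + 1) _ _ (by omega) (by omega)]
          simp [pvCollect, hok, hcn]
      · rw [if_neg hok, hcast, ih (k + 1) _ _ (by omega) (by omega)]
        simp [pvCollect, hok]

-- Zeroing the block [i+m-1, …, i] (i = p.length) zeroes the first m elements after p.
lemma pvZeroBlock (p l : List Int) : ∀ (m : Nat), m ≤ l.length →
    List.foldl pvSetZero (p ++ l)
      ((List.range m).map (fun k : Nat => (p.length : Int) + m - 1 - (k : Int)))
      = p ++ (List.replicate m 0 ++ l.drop m) := by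
  intro m
  induction m generalizing l with
  | zero => simp
  | succ m ih =>
    intro hm
    have hlt : m < l.length := by omega
    rw [List.range_succ_eq_map, List.map_cons, List.map_map, List.foldl_cons]
    have hf0 : ((p.length : Int) + (↑(m + 1) : Int) - 1 - ((0 : Nat) : Int)) = (p.length : Int) + ((m : Nat) : Int) := by
      push_cast; ring
    rw [hf0, pvSetZero_append p l m]
    have hmap : (List.range m).map ((fun k : Nat => (p.length : Int) + (↑(m + 1) : Int) - 1 - (k : Int)) ∘ (· + 1))
        = (List.range m).map (fun k : Nat => (p.length : Int) + (m : Int) - 1 - (k : Int)) := by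
      apply List.map_congr_left
      intro k _
      simp only [Function.comp]
      push_cast; ring
    rw [hmap, ih (l.set m 0) (by simp; omega)]
    have hdrop : (l.set m 0).drop m = 0 :: l.drop (m + 1) := by
      rw [List.drop_set, if_neg (by omega), Nat.sub_self, List.drop_eq_getElem_cons hlt,
        List.set_cons_zero]
    rw [hdrop, List.replicate_succ']
    simp

-- pvCollect across one maximal in-range run.
lemma pvCollect_run (range_min range_max n : Int) :
    ∀ (run : List Int), (∀ y ∈ run, range_min ≤ y ∧ y ≤ range_max) →
    ∀ (rest : List Int), (rest = [] ∨ ∃ y ys, rest = y :: ys ∧ ¬(range_min ≤ y ∧ y ≤ range_max)) →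
    ∀ (c i : Int),
    pvCollect range_min range_max n c i (run ++ rest)
      = (if c < n ∧ n ≤ c + run.length then
           (PySem.List.pyRange 0 n 1).map (fun j => (i + (n - c) - 1) - j)
         else [])
        ++ pvCollect range_min range_max n 0 (i + run.length) rest := by
  intro run
  induction run with
  | nil =>
    intro _ rest hrest c i
    simp only [List.nil_append, List.length_nil, Nat.cast_zero, add_zero]
    rw [if_neg (by omega)]
    rcases hrest with h | ⟨y, ys, rfl, hy⟩
    · subst h; simp [pvCollect]
    · simp [pvCollect, hy]
  | cons x run' ih =>
    intro hok rest hrest c i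
    have hx := hok x (List.mem_cons_self)
    simp only [List.cons_append, List.length_cons]
    simp only [pvCollect, if_pos hx]
    rw [ih (fun y hy => hok y (List.mem_cons_of_mem x hy)) rest hrest (c + 1) (i + 1)]
    have hidx : i + 1 + (run'.length : Int) = i + ((run'.length + 1 : Nat) : Int) := by
      push_cast; ring
    rw [hidx]
    by_cases hcn : c + 1 = n
    · rw [if_pos hcn, if_neg (by omega), if_pos (by push_cast; omega)]
      have hfun : (fun j : Int => i + (n - c) - 1 - j) = (fun j : Int => i - j) :=
        funext fun j => by omega
      rw [hfun]
      simp
    · rw [if_neg hcn]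
      by_cases h2 : c + 1 < n ∧ n ≤ c + 1 + (run'.length : Int)
      · rw [if_pos h2, if_pos (by push_cast; omega)]
        have hfun : (fun j : Int => i + 1 + (n - (c + 1)) - 1 - j)
            = (fun j : Int => i + (n - c) - 1 - j) := funext fun j => by omega
        rw [hfun]
        simp
      · rw [if_neg h2, if_neg (by push_cast at h2 ⊢; omega)]
        simp

-- main induction: applying A's resets for the suffix l (sitting after prefix p) yields B's output.
lemma pvMain (range_min range_max n : Int) :
    ∀ (N : Nat) (l : List Int), l.length ≤ N → ∀ (p : List Int),
    List.foldl pvSetZero (p ++ l)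
      (pvCollect range_min range_max n 0 (p.length : Int) l)
      = p ++ altGo range_min range_max n l := by
  intro N
  induction N with
  | zero =>
    intro l hl p
    have hnil : l = [] := List.length_eq_zero_iff.mp (by omega)
    subst hnil
    simp [pvCollect, altGo]
  | succ N ih =>
    intro l hl p
    match l with
    | [] => simp [pvCollect, altGo]
    | x :: xs =>
      by_cases hok : range_min ≤ x ∧ x ≤ range_max
      · -- in-range head: one maximal run
        have hq : (fun y => decide (range_min ≤ y ∧ y ≤ range_max)) x = true := by
          simp [hok.1, hok.2]
        have hsplit : ((x :: xs).takeWhile fun y => decide (range_min ≤ y ∧ y ≤ range_max))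
            ++ ((x :: xs).dropWhile fun y => decide (range_min ≤ y ∧ y ≤ range_max)) = x :: xs :=
          List.takeWhile_append_dropWhile
        have hrunok : ∀ y ∈ ((x :: xs).takeWhile fun y => decide (range_min ≤ y ∧ y ≤ range_max)),
            range_min ≤ y ∧ y ≤ range_max := by
          intro y hy
          have := List.mem_takeWhile_imp hy
          simpa using this
        have hrestc : ((x :: xs).dropWhile fun y => decide (range_min ≤ y ∧ y ≤ range_max)) = []
            ∨ ∃ y ys, ((x :: xs).dropWhile fun y => decide (range_min ≤ y ∧ y ≤ range_max)) = y :: ys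
                ∧ ¬(range_min ≤ y ∧ y ≤ range_max) := by
          cases hcase : ((x :: xs).dropWhile fun y => decide (range_min ≤ y ∧ y ≤ range_max)) with
          | nil => exact Or.inl rfl
          | cons y ys =>
            refine Or.inr ⟨y, ys, rfl, ?_⟩
            have := pvDropWhileHead _ _ _ _ hcase
            simpa using this
        have hdw : ((x :: xs).dropWhile fun y => decide (range_min ≤ y ∧ y ≤ range_max))
            = xs.dropWhile fun y => decide (range_min ≤ y ∧ y ≤ range_max) :=
          List.dropWhile_cons_of_pos hq
        have hrestlen : ((x :: xs).dropWhile fun y => decide (range_min ≤ y ∧ y ≤ range_max)).length ≤ N := by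
          rw [hdw]
          have := List.length_dropWhile_le (fun y => decide (range_min ≤ y ∧ y ≤ range_max)) xs
          simp at hl; omega
        have halt : altGo range_min range_max n (x :: xs)
            = (if n ≤ (((x :: xs).takeWhile fun y => decide (range_min ≤ y ∧ y ≤ range_max)).length : Int) then
                 List.replicate (max n 0).toNat 0 ++
                   (((x :: xs).takeWhile fun y => decide (range_min ≤ y ∧ y ≤ range_max)).drop (max n 0).toNat)
               else (x :: xs).takeWhile fun y => decide (range_min ≤ y ∧ y ≤ range_max))
              ++ altGo range_min range_max n ((x :: xs).dropWhile fun y => decide (range_min ≤ y ∧ y ≤ range_max)) := by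
          rw [altGo]
          rw [dif_pos hok]
        conv_lhs => rw [← hsplit]
        rw [pvCollect_run range_min range_max n _ hrunok _ hrestc 0 (p.length : Int),
          List.foldl_append, halt]
        set run := ((x :: xs).takeWhile fun y => decide (range_min ≤ y ∧ y ≤ range_max)) with hrun
        set rest := ((x :: xs).dropWhile fun y => decide (range_min ≤ y ∧ y ≤ range_max)) with hrest
        by_cases hblk : (0 : Int) < n ∧ n ≤ 0 + (run.length : Int)
        · rw [if_pos hblk]
          have hmn : ((n.toNat : Nat) : Int) = n := by omega
          have hmle : n.toNat ≤ (run ++ rest).length := by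
            simp [List.length_append]; omega
          have hmap : (PySem.List.pyRange 0 n 1).map (fun j => (p.length : Int) + (n - 0) - 1 - j)
              = (List.range n.toNat).map (fun k : Nat => (p.length : Int) + n.toNat - 1 - (k : Int)) := by
            rw [PySem.List.pyRange_one, List.map_map]
            simp only [Int.sub_zero]
            apply List.map_congr_left
            intro k _
            simp only [Function.comp]
            omega
          rw [hmap, pvZeroBlock p (run ++ rest) n.toNat hmle]
          have hdropapp : (run ++ rest).drop n.toNat = run.drop n.toNat ++ rest :=
            List.drop_append_of_le_length (by omega)
          rw [hdropapp]
          have hre : p ++ (List.replicate n.toNat 0 ++ (run.drop n.toNat ++ rest))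
              = (p ++ (List.replicate n.toNat 0 ++ run.drop n.toNat)) ++ rest := by
            simp [List.append_assoc]
          rw [hre]
          have hplen : (p.length : Int) + (run.length : Int)
              = (((p ++ (List.replicate n.toNat 0 ++ run.drop n.toNat)).length : Nat) : Int) := by
            simp [List.length_append, List.length_replicate, List.length_drop]
            omega
          rw [hplen, ih rest hrestlen (p ++ (List.replicate n.toNat 0 ++ run.drop n.toNat))]
          rw [if_pos (by omega), show (max n 0).toNat = n.toNat by omega]
          simp [List.append_assoc]
        · rw [if_neg hblk, List.foldl_nil]
          have hre : p ++ (run ++ rest) = (p ++ run) ++ rest := by simp [List.append_assoc]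
          have hplen : (p.length : Int) + (run.length : Int) = (((p ++ run).length : Nat) : Int) := by
            push_cast [List.length_append]; ring
          rw [hre, hplen, ih rest hrestlen (p ++ run)]
          have hrun' : (if n ≤ ((run.length : Nat) : Int) then
                 List.replicate (max n 0).toNat 0 ++ run.drop (max n 0).toNat
               else run) = run := by
            by_cases hn : n ≤ ((run.length : Nat) : Int)
            · rw [if_pos hn, show (max n 0).toNat = 0 by omega]
              simp
            · rw [if_neg hn]
          rw [hrun']
          simp [List.append_assoc]
      · -- out-of-range head
        simp only [pvCollect, if_neg hok]
        have h1 : p ++ x :: xs = (p ++ [x]) ++ xs := by simp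
        have h2 : (p.length : Int) + 1 = (((p ++ [x]).length : Nat) : Int) := by
          simp
        rw [h1, h2, ih xs (by simp at hl; omega) (p ++ [x])]
        have halt : altGo range_min range_max n (x :: xs) = x :: altGo range_min range_max n xs := by
          rw [altGo]
          rw [dif_neg hok]
        rw [halt]
        simp

-- ===== VERDICT (by name: the statement is the Claim_ definition above) =====
theorem reset_consecutive_values_spec : Claim_equal_reset_consecutive_values := by
  intro data range_min range_max n _
  unfold Spec_reset_consecutive_values reset_consecutive_values reset_consecutive_values_alt
  have h1 := pvFold_eq_collect range_min range_max n data data.length 0 0 [] (by omega) (by omega)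
  simp only [Nat.cast_zero, List.drop_zero, List.nil_append] at h1
  rw [h1]
  have h2 := pvMain range_min range_max n data.length data (by omega) []
  simpa using h2
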